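-- pv_equiv track=rewrite | github.com/ayagup/genai-patterns | python/136_accessibility_focused_agent.py | _order_for_scanning
-- ===== SOURCE A (Python) =====
-- from typing import Dict, List, Any, Optional, Set, Callable
--
-- def _order_for_scanning(
--
--     elements: List[Dict[str, Any]]
-- ) -> List[Dict[str, Any]]:
--     """Order elements for optimal scanning."""
--     # Simple: maintain order but group by type
--     grouped = {}
--
--     for element in elements:
--         elem_type = element.get('type', 'other')
--         if elem_type not in grouped:
--             grouped[elem_type] = []
--         grouped[elem_type].append(element)
--
--     # Priority order
--     priority = ['button', 'link', 'input', 'other']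
--     ordered = []
--
--     for elem_type in priority:
--         if elem_type in grouped:
--             ordered.extend(grouped[elem_type])
--
--     return ordered
-- ===== SOURCE B (Python) =====
-- def _order_for_scanning(elements):
--     """Order elements for optimal scanning."""
--     priority = ['button', 'link', 'input', 'other']
--     return [e for t in priority for e in elements
--             if e.get('type', 'other') == t]
-- ===== Notes on version B (the rewrite author's own statement) =====
-- stated objective: simpler
-- what changed: Replaces the dict-bucketing pass plus priority readout with a single comprehension that, for each priority type in order, filters the elements of that type and concatenates the passes.
import Mathlib
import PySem

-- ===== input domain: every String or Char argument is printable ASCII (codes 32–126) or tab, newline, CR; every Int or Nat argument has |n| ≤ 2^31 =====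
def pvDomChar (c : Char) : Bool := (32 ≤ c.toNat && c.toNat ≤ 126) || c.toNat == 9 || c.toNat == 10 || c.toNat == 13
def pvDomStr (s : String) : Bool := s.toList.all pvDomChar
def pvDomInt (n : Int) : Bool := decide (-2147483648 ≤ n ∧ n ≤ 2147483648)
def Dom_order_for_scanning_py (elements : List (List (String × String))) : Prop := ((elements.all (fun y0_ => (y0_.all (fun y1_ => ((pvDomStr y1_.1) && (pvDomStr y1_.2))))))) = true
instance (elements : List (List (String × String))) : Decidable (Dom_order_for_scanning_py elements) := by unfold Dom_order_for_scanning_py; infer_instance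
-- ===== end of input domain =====

-- B drops A's dict-bucketing loop for one per-priority filtering comprehension (simpler; same result, proved below).

-- element.get('type', 'other') on an association-list dict: first match, default 'other'
def pvGetType (e : List (String × String)) : String :=
  (((e.find? (fun p => p.1 == "type")).map Prod.snd).getD "other")

-- A's grouping loop body (the for-loop over elements)
def pvGroupStep (d : PySem.Dict String (List (List (String × String))))
    (element : List (String × String)) : PySem.Dict String (List (List (String × String))) :=
  let elemType := pvGetType element
  let d1 := if d.contains elemType then d else d.insert elemType []
  d1.modify elemType [] (fun l => l ++ [element])

-- ===== PORT A =====
def order_for_scanning_py (elements : List (List (String × String))) : List (List (String × String)) :=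
  let grouped : PySem.Dict String (List (List (String × String))) :=
    elements.foldl pvGroupStep PySem.Dict.empty
  let priority := ["button", "link", "input", "other"]
  priority.foldl (fun ordered elemType =>
    if grouped.contains elemType then ordered ++ grouped.getD elemType [] else ordered) []

-- ===== PORT B =====
def order_for_scanning_py_alt (elements : List (List (String × String))) : List (List (String × String)) :=
  ["button", "link", "input", "other"].flatMap (fun t =>
    elements.filter (fun e => pvGetType e == t))

-- ===== PRECONDITION & SPEC =====
def Spec_order_for_scanning_py (elements : List (List (String × String))) (out : List (List (String × String))) : Prop := out = order_for_scanning_py_alt elements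
instance (elements : List (List (String × String))) (out : List (List (String × String))) : Decidable (Spec_order_for_scanning_py elements out) := by unfold Spec_order_for_scanning_py; infer_instance

-- ===== CLAIM (what is proved, stated in full; the proofs are below) =====
def Claim_equal_order_for_scanning_py : Prop := ∀ (elements : List (List (String × String))), Dom_order_for_scanning_py elements → Spec_order_for_scanning_py elements (order_for_scanning_py elements)

-- ===== LEMMAS AND PROOFS =====

-- the grouping-loop invariant: each bucket of A's dict is the filter of the elements seen so far
theorem buildA_getD (xs : List (List (String × String)))
    (d : PySem.Dict String (List (List (String × String)))) (t : String) :
    (xs.foldl pvGroupStep d).getD t []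
      = d.getD t [] ++ xs.filter (fun e => pvGetType e == t) := by
  induction xs generalizing d with
  | nil => simp
  | cons x xs ih =>
      simp only [List.foldl_cons, pvGroupStep, ih, List.filter_cons]
      by_cases ht : pvGetType x = t
      · subst ht
        simp only [beq_self_eq_true, if_true]
        by_cases hc : d.contains (pvGetType x) = true
        · rw [if_pos hc, PySem.Dict.getD_modify_self]
          simp
        · rw [if_neg hc, PySem.Dict.getD_modify_self, PySem.Dict.getD_insert_self,
              PySem.Dict.getD_of_not_contains d _ (by simpa using hc)]
          simp
      · have hne : (pvGetType x == t) = false := by simpa using ht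
        simp only [hne, Bool.false_eq_true, if_false]
        by_cases hc : d.contains (pvGetType x) = true
        · rw [if_pos hc, PySem.Dict.getD_modify_of_ne _ _ _ (Ne.symm ht)]
        · rw [if_neg hc, PySem.Dict.getD_modify_of_ne _ _ _ (Ne.symm ht),
              PySem.Dict.getD_insert_of_ne _ _ _ (Ne.symm ht)]

-- keys of A's dict: exactly the types occurring so far
theorem buildA_contains (xs : List (List (String × String)))
    (d : PySem.Dict String (List (List (String × String)))) (t : String) :
    ((xs.foldl pvGroupStep d).contains t = true)
      ↔ (d.contains t = true ∨ t ∈ xs.map pvGetType) := by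
  induction xs generalizing d with
  | nil => simp
  | cons x xs ih =>
      simp only [List.foldl_cons, pvGroupStep]
      by_cases hc : d.contains (pvGetType x) = true
      · rw [if_pos hc, ih]
        simp only [PySem.Dict.contains_modify, Bool.or_eq_true, beq_iff_eq,
          List.map_cons, List.mem_cons]
        tauto
      · rw [if_neg hc, ih]
        simp only [PySem.Dict.contains_modify, PySem.Dict.contains_insert,
          Bool.or_eq_true, beq_iff_eq, List.map_cons, List.mem_cons]
        tauto

-- the readout loop over any priority list is the concatenation of the per-type filters
theorem readout (elements : List (List (String × String))) (ps : List String)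
    (acc : List (List (String × String))) :
    ps.foldl (fun ordered elemType =>
      if (elements.foldl pvGroupStep PySem.Dict.empty).contains elemType
      then ordered ++ (elements.foldl pvGroupStep PySem.Dict.empty).getD elemType []
      else ordered) acc
    = acc ++ ps.flatMap (fun t => elements.filter (fun e => pvGetType e == t)) := by
  induction ps generalizing acc with
  | nil => simp
  | cons p ps ih =>
      simp only [List.foldl_cons, List.flatMap_cons]
      by_cases hc : (elements.foldl pvGroupStep PySem.Dict.empty).contains p = true
      · rw [if_pos hc, ih, buildA_getD, PySem.Dict.getD_empty, List.nil_append, List.append_assoc]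
      · rw [if_neg hc, ih]
        have hmem : p ∉ elements.map pvGetType := by
          intro hm
          exact hc ((buildA_contains elements PySem.Dict.empty p).mpr (Or.inr hm))
        have hfil : elements.filter (fun e => pvGetType e == p) = [] := by
          rw [List.filter_eq_nil_iff]
          intro e he hbe
          exact hmem (List.mem_map.mpr ⟨e, he, by simpa using hbe⟩)
        rw [hfil, List.nil_append]

-- ===== VERDICT (by name: the statement is the Claim_ definition above) =====
theorem order_for_scanning_py_spec : Claim_equal_order_for_scanning_py := by
  intro elements _
  unfold Spec_order_for_scanning_py order_for_scanning_py order_for_scanning_py_alt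
  simpa using readout elements ["button", "link", "input", "other"] []
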